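-- pv_equiv track=rewrite | github.com/vquilon/mslearn-ai-language | Labfiles/07-speech/Python/speaking-clock/speaking-clock.py | split_by_prosody
-- ===== SOURCE A (Python) =====
-- def split_by_prosody(buffer):
--     # Dividir el buffer en bloques delimitados por <prosody> y </prosody>
--     blocks = []
--     start = 0
--     while start < len(buffer):
--         open_tag = buffer.find("<prosody>", start)
--         close_tag = buffer.find("</prosody>", open_tag)
--         if open_tag != -1 and close_tag != -1:
--             blocks.append(buffer[open_tag:close_tag + 10])  # Incluir etiquetas
--             start = close_tag + 10
--         else:
--             break
--     return blocks
-- ===== SOURCE B (Python) =====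
-- def split_by_prosody(buffer):
--     blocks = []
--     chunks = buffer.split("</prosody>")
--     for chunk in chunks[:-1]:
--         p = chunk.find("<prosody>")
--         if p != -1:
--             blocks.append(chunk[p:] + "</prosody>")
--     return blocks
-- ===== Notes on version B (the rewrite author's own statement) =====
-- stated objective: alternative
-- what changed: Replaced the stateful cursor loop (find open tag from start, find close tag, advance past it) by a single split on the close tag followed by one open-tag scan per chunk, emitting chunk[p:] + the close tag.
import Mathlib
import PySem

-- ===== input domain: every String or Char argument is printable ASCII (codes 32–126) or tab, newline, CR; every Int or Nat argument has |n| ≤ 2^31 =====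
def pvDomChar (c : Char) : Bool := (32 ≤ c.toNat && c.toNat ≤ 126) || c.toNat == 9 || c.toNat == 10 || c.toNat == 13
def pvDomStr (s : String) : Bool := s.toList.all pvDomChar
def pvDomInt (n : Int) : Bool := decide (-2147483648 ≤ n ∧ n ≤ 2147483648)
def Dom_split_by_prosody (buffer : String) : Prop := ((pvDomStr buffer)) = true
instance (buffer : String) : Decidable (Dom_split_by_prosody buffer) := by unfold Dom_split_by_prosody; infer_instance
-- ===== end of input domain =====

-- B replaces A's stateful cursor loop by one split on "</prosody>" plus one open-tag scan per chunk (alternative decomposition, same cost).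

-- The two tag literals, as char lists ("<prosody>".toList / "</prosody>".toList).
def pvOpenTag : List Char := ['<','p','r','o','s','o','d','y','>']
def pvCloseTag : List Char := ['<','/','p','r','o','s','o','d','y','>']

-- ===== PORT A =====
-- A's while-loop: start is Python's `start` cursor (always a nonnegative int, kept as Nat);
-- buffer.find(sub, i) = PySem.Chars.findFrom, buffer[open:close+10] = PySem.Chars.slice.
def pvLoopA (cs : List Char) (start : Nat) : List String :=
  if hlt : start < cs.length then
    let o := PySem.Chars.findFrom cs pvOpenTag (start : Int)
    let c := PySem.Chars.findFrom cs pvCloseTag o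
    if hoc : o ≠ -1 ∧ c ≠ -1 then
      String.ofList (PySem.Chars.slice cs (some o) (some (c + 10))) :: pvLoopA cs (c.toNat + 10)
    else []
  else []
termination_by cs.length - start
decreasing_by
  · have h1 := PySem.Chars.findFrom_natCast_spec cs pvOpenTag start (by omega) hoc.1
    have ho0 : (0:Int) ≤ PySem.Chars.findFrom cs pvOpenTag (start : Int) := le_trans (by exact_mod_cast Nat.zero_le start) h1.1
    have hoe : ((PySem.Chars.findFrom cs pvOpenTag (start : Int)).toNat : Int) = PySem.Chars.findFrom cs pvOpenTag (start : Int) := Int.toNat_of_nonneg ho0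
    have hole : (PySem.Chars.findFrom cs pvOpenTag (start : Int)).toNat ≤ cs.length := by
      have hle := h1.2.1.length_le
      rw [List.length_drop] at hle
      have h9 : pvOpenTag.length = 9 := rfl
      omega
    have h2 := PySem.Chars.findFrom_natCast_spec cs pvCloseTag (PySem.Chars.findFrom cs pvOpenTag (start : Int)).toNat hole (by rw [hoe]; exact hoc.2)
    rw [hoe] at h2
    have hco : (start : Int) ≤ PySem.Chars.findFrom cs pvCloseTag (PySem.Chars.findFrom cs pvOpenTag (start : Int)) := by
      have := h2.1
      omega
    have : start ≤ (PySem.Chars.findFrom cs pvCloseTag (PySem.Chars.findFrom cs pvOpenTag (start : Int))).toNat := by omega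
    omega

def split_by_prosody (buffer : String) : List String :=
  pvLoopA buffer.toList 0

-- ===== PORT B =====
-- B's loop body: p = chunk.find("<prosody>"); if p != -1: blocks.append(chunk[p:] + "</prosody>").
def pvEmitB (blocks : List String) (chunk : List Char) : List String :=
  let p := PySem.Chars.find chunk pvOpenTag
  if p ≠ -1 then blocks ++ [String.ofList (PySem.Chars.slice chunk (some p) none ++ pvCloseTag)]
  else blocks

-- buffer.split("</prosody>") = PySem.Chars.splitOn (sep is nonempty); chunks[:-1] = PySem.List.slice … (-1).
def split_by_prosody_alt (buffer : String) : List String :=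
  let chunks := PySem.Chars.splitOn buffer.toList pvCloseTag
  (PySem.List.slice chunks none (some (-1))).foldl pvEmitB []

-- ===== PRECONDITION & SPEC =====
def Spec_split_by_prosody (buffer : String) (out : List String) : Prop := out = split_by_prosody_alt buffer
instance (buffer : String) (out : List String) : Decidable (Spec_split_by_prosody buffer out) := by unfold Spec_split_by_prosody; infer_instance

-- ===== CLAIM (what is proved, stated in full; the proofs are below) =====
def Claim_equal_split_by_prosody : Prop := ∀ (buffer : String), Dom_split_by_prosody buffer → Spec_split_by_prosody buffer (split_by_prosody buffer)

-- ===== LEMMAS AND PROOFS =====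

-- Clean recursive model of PySem.Chars.splitOn with sep = pvCloseTag.
def pvChunks : List Char → List (List Char)
  | [] => [[]]
  | c :: rest =>
    if pvCloseTag.isPrefixOf (c :: rest) then [] :: pvChunks ((c :: rest).drop 10)
    else match pvChunks rest with
      | [] => [[c]]
      | h :: t => (c :: h) :: t
termination_by l => l.length
decreasing_by
  · simp
  · simp

-- Relative (suffix-based) restatement of A's loop.
def pvRa (ds : List Char) : List String :=
  let o := PySem.Chars.find ds pvOpenTag
  if ho : o = -1 then [] else
    let c := PySem.Chars.find (ds.drop o.toNat) pvCloseTag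
    if hc : c = -1 then [] else
      String.ofList ((ds.drop o.toNat).take (c.toNat + 10)) :: pvRa (ds.drop (o.toNat + c.toNat + 10))
termination_by ds.length
decreasing_by
  · have hne := PySem.Chars.neg_one_le_find ds pvOpenTag
    have h0 : (0:Int) ≤ PySem.Chars.find ds pvOpenTag := by omega
    have hinf : pvOpenTag <:+: ds := (PySem.Chars.find_nonneg_iff ds pvOpenTag).1 h0
    have h9 : pvOpenTag.length = 9 := rfl
    have := hinf.length_le
    simp
    omega

lemma pv_no_overlap {ds : List Char} {j k : Nat} (hC : pvCloseTag <+: ds.drop j)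
    (hO : pvOpenTag <+: ds.drop (j + k)) (hk : k < 10) : False := by
  have hC' : pvCloseTag = (ds.drop j).take 10 := List.prefix_iff_eq_take.1 hC
  have hu : ds.drop j = pvCloseTag ++ (ds.drop j).drop 10 := by
    conv_lhs => rw [← List.take_append_drop 10 (ds.drop j)]
    rw [← hC']
  have hO' : pvOpenTag = ((ds.drop j).drop k).take 9 := by
    have : ds.drop (j + k) = (ds.drop j).drop k := by rw [List.drop_drop, Nat.add_comm]
    rw [this] at hO
    exact List.prefix_iff_eq_take.1 hO
  rw [hu, List.drop_append_of_le_length (by simp [pvCloseTag]; omega)] at hO'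
  interval_cases k <;> simp [pvOpenTag, pvCloseTag] at hO'

lemma pv_no_overlap' {ds : List Char} {o k : Nat} (hO : pvOpenTag <+: ds.drop o)
    (hC : pvCloseTag <+: ds.drop (o + k)) (hk1 : 1 ≤ k) (hk : k < 9) : False := by
  have hO' : pvOpenTag = (ds.drop o).take 9 := List.prefix_iff_eq_take.1 hO
  have hu : ds.drop o = pvOpenTag ++ (ds.drop o).drop 9 := by
    conv_lhs => rw [← List.take_append_drop 9 (ds.drop o)]
    rw [← hO']
  have hC' : pvCloseTag = ((ds.drop o).drop k).take 10 := by
    have : ds.drop (o + k) = (ds.drop o).drop k := by rw [List.drop_drop, Nat.add_comm]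
    rw [this] at hC
    exact List.prefix_iff_eq_take.1 hC
  rw [hu, List.drop_append_of_le_length (by simp [pvOpenTag]; omega)] at hC'
  interval_cases k <;> simp [pvOpenTag, pvCloseTag] at hC'

-- find pinned by an occurrence with minimality
lemma pv_find_eq_of {ds sub : List Char} {p : Nat} (h1 : sub <+: ds.drop p)
    (h2 : ∀ i < p, ¬ sub <+: ds.drop i) : PySem.Chars.find ds sub = (p : Int) := by
  have hinf : sub <:+: ds := h1.isInfix.trans (List.drop_suffix p ds).isInfix
  have h0 : (0:Int) ≤ PySem.Chars.find ds sub := (PySem.Chars.find_nonneg_iff ds sub).2 hinf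
  obtain ⟨hpre, hmin⟩ := PySem.Chars.find_spec h0
  rcases lt_trichotomy (PySem.Chars.find ds sub).toNat p with hlt | heq | hgt
  · exact absurd hpre (h2 _ hlt)
  · omega
  · exact absurd h1 (hmin p hgt)

lemma pv_prefix_of_take_prefix {p l : List Char} {n i : Nat} (h : p <+: (l.take n).drop i) :
    p <+: l.drop i := by
  rw [List.drop_take] at h
  exact h.trans (List.take_prefix _ _)

lemma pv_chunks_ne_nil (l : List Char) : pvChunks l ≠ [] := by
  cases l with
  | nil => simp [pvChunks]
  | cons c rest =>
    rw [pvChunks]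
    split
    · simp
    · split <;> simp

lemma pv_go_eq (fuel : Nat) : ∀ (l cur : List Char) (acc : List (List Char)),
    l.length < fuel → ∀ h t, pvChunks l = h :: t →
    PySem.Chars.splitOn.go pvCloseTag fuel l cur acc = acc.reverse ++ (cur.reverse ++ h) :: t := by
  induction fuel with
  | zero => intro l cur acc hlen; omega
  | succ fuel ih =>
    intro l cur acc hlen h t hch
    cases l with
    | nil =>
      simp [pvChunks] at hch
      obtain ⟨rfl, rfl⟩ := hch
      rw [PySem.Chars.splitOn.go]
      simp
      omega
    | cons c rest =>
      by_cases hp : pvCloseTag.isPrefixOf (c :: rest) = true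
      · rw [pvChunks, if_pos hp] at hch
        obtain ⟨h2, t2, hch2⟩ : ∃ h2 t2, pvChunks ((c :: rest).drop 10) = h2 :: t2 := by
          rcases hx : pvChunks ((c :: rest).drop 10) with _ | ⟨h2, t2⟩
          · exact absurd hx (pv_chunks_ne_nil _)
          · exact ⟨h2, t2, rfl⟩
        rw [hch2] at hch
        rw [PySem.Chars.splitOn.go]
        simp only [hp, if_true]
        have hlen2 : ((c :: rest).drop 10).length < fuel := by
          simp at hlen ⊢; omega
        rw [show ((pvCloseTag.length) = 10) from rfl]
        rw [ih _ [] (cur.reverse :: acc) hlen2 h2 t2 hch2]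
        simp at hch
        obtain ⟨rfl, rfl⟩ := hch
        simp
      · rw [pvChunks, if_neg hp] at hch
        obtain ⟨h2, t2, hch2⟩ : ∃ h2 t2, pvChunks rest = h2 :: t2 := by
          rcases hx : pvChunks rest with _ | ⟨h2, t2⟩
          · exact absurd hx (pv_chunks_ne_nil _)
          · exact ⟨h2, t2, rfl⟩
        rw [hch2] at hch
        simp at hch
        rw [PySem.Chars.splitOn.go]
        simp only [hp, reduceIte]
        have hlen2 : rest.length < fuel := by simp at hlen; omega
        rw [ih rest (c :: cur) acc hlen2 h2 t2 hch2]
        obtain ⟨rfl, rfl⟩ := hch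
        simp

lemma pv_splitOn_eq (l : List Char) : PySem.Chars.splitOn l pvCloseTag = pvChunks l := by
  obtain ⟨h, t, hch⟩ : ∃ h t, pvChunks l = h :: t := by
    rcases hx : pvChunks l with _ | ⟨h, t⟩
    · exact absurd hx (pv_chunks_ne_nil _)
    · exact ⟨h, t, rfl⟩
  show PySem.Chars.splitOn.go pvCloseTag (l.length + 1) l [] [] = _
  rw [pv_go_eq (l.length + 1) l [] [] (by omega) h t hch, hch]
  simp

lemma pv_chunks_no_close {l : List Char} (h : ∀ i, ¬ pvCloseTag <+: l.drop i) :
    pvChunks l = [l] := by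
  induction l using pvChunks.induct with
  | case1 => simp [pvChunks]
  | case2 c rest hp ih =>
    exact absurd ((List.isPrefixOf_iff_prefix).1 hp) (h 0)
  | case3 c rest hp hnil ih =>
    exact absurd hnil (pv_chunks_ne_nil rest)
  | case4 c rest hp h2 t2 hch ih =>
    rw [pvChunks, if_neg hp, hch]
    have := ih (fun i => h (i + 1))
    rw [hch] at this
    simp at this
    simp [this.1, this.2]

lemma pv_chunks_close {l : List Char} {j : Nat} (h1 : pvCloseTag <+: l.drop j)
    (h2 : ∀ i < j, ¬ pvCloseTag <+: l.drop i) :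
    pvChunks l = l.take j :: pvChunks (l.drop (j + 10)) := by
  induction l using pvChunks.induct generalizing j with
  | case1 =>
    rw [List.drop_nil] at h1
    have := List.prefix_nil.1 h1
    simp [pvCloseTag] at this
  | case2 c rest hp ih =>
    have hj : j = 0 := by
      by_contra hj
      exact absurd ((List.isPrefixOf_iff_prefix).1 hp) (h2 0 (by omega))
    subst hj
    rw [pvChunks, if_pos hp]
    simp
  | case3 c rest hp hnil ih =>
    exact absurd hnil (pv_chunks_ne_nil rest)
  | case4 c rest hp hh ht hch ih =>
    have hj : j ≠ 0 := by
      rintro rfl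
      rw [List.drop_zero] at h1
      exact hp ((List.isPrefixOf_iff_prefix).2 h1)
    obtain ⟨j', rfl⟩ : ∃ j', j = j' + 1 := ⟨j - 1, by omega⟩
    have ih' := ih (j := j') h1 (fun i hi => h2 (i + 1) (by omega))
    rw [hch] at ih'
    obtain ⟨he1, he2⟩ := List.cons.inj ih'
    rw [pvChunks, if_neg hp, hch]
    have hm : (match hh :: ht with | [] => [[c]] | h :: t => (c :: h) :: t) = (c :: hh) :: ht := rfl
    rw [hm, he1, he2, List.take_succ_cons,
      show (j' + 1 + 10 : Nat) = (j' + 10) + 1 from rfl, List.drop_succ_cons]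

lemma pv_emit_acc (ch : List Char) (acc : List String) :
    pvEmitB acc ch = acc ++ pvEmitB [] ch := by
  by_cases h : PySem.Chars.find ch pvOpenTag ≠ -1 <;> simp [pvEmitB, h]

lemma pv_foldl_emit_acc (t : List (List Char)) : ∀ acc : List String,
    t.foldl pvEmitB acc = acc ++ t.foldl pvEmitB [] := by
  induction t with
  | nil => simp
  | cons h t ih =>
    intro acc
    rw [List.foldl_cons, List.foldl_cons, ih, pv_emit_acc, ih (pvEmitB [] h)]
    simp

-- B's fold over the chunks, as a function of the raw char list.
def pvG (ds : List Char) : List String := ((pvChunks ds).dropLast).foldl pvEmitB []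


lemma pv_drop_drop (l : List Char) (n m : Nat) : (l.drop n).drop m = l.drop (n + m) := by
  rw [List.drop_drop, Nat.add_comm]

lemma pv_infix_iff {sub l : List Char} : sub <:+: l ↔ ∃ i, sub <+: l.drop i := by
  constructor
  · rintro ⟨s, t, rfl⟩
    exact ⟨s.length, by simpa using (⟨t, rfl⟩ : sub <+: sub ++ t)⟩
  · rintro ⟨i, hp⟩
    exact hp.isInfix.trans (List.drop_suffix i l).isInfix

lemma pv_find_neg {l sub : List Char} (h : ∀ i, ¬ sub <+: l.drop i) :
    PySem.Chars.find l sub = -1 :=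
  (PySem.Chars.find_eq_neg_one_iff l sub).2 (fun hinf => by
    obtain ⟨i, hp⟩ := pv_infix_iff.1 hinf
    exact h i hp)

lemma pv_find_pos {l sub : List Char} (h : PySem.Chars.find l sub ≠ -1) :
    ∃ p : Nat, PySem.Chars.find l sub = (p : Int) ∧ sub <+: l.drop p ∧
      ∀ i < p, ¬ sub <+: l.drop i := by
  have hge := PySem.Chars.neg_one_le_find l sub
  have h0 : (0:Int) ≤ PySem.Chars.find l sub := by omega
  obtain ⟨hpre, hmin⟩ := PySem.Chars.find_spec h0
  exact ⟨(PySem.Chars.find l sub).toNat, (Int.toNat_of_nonneg h0).symm, hpre, hmin⟩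

lemma pv_no_open_in_take {ds : List Char} {j o' : Nat}
    (hmin : ∀ i < o', ¬ pvOpenTag <+: ds.drop i) (hj : j ≤ o' + 8) :
    PySem.Chars.find (ds.take j) pvOpenTag = -1 := by
  apply pv_find_neg
  intro i hp
  have hfit := hp.length_le
  rw [List.length_drop, List.length_take] at hfit
  have h9 : pvOpenTag.length = 9 := rfl
  exact hmin i (by omega) (pv_prefix_of_take_prefix hp)

lemma pv_find_open_take {ds : List Char} {j o' : Nat} (hO : pvOpenTag <+: ds.drop o')
    (hmin : ∀ i < o', ¬ pvOpenTag <+: ds.drop i) (hfit : o' + 9 ≤ j) :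
    PySem.Chars.find (ds.take j) pvOpenTag = (o' : Int) := by
  apply pv_find_eq_of
  · rw [List.drop_take]
    rw [List.prefix_take_iff]
    exact ⟨hO, by simp [pvOpenTag]; omega⟩
  · intro i hi hp
    exact hmin i hi (pv_prefix_of_take_prefix hp)

lemma pv_find_shift {ds sub : List Char} (m p : Nat) (h1 : sub <+: ds.drop (m + p))
    (h2 : ∀ i < p, ¬ sub <+: ds.drop (m + i)) :
    PySem.Chars.find (ds.drop m) sub = (p : Int) := by
  apply pv_find_eq_of
  · rw [pv_drop_drop]; exact h1
  · intro i hi hp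
    rw [pv_drop_drop] at hp
    exact h2 i hi hp

lemma pv_ra_neg {ds : List Char} (h : PySem.Chars.find ds pvOpenTag = -1) : pvRa ds = [] := by
  rw [pvRa]; simp [h]

lemma pv_ra_neg2 {ds : List Char} (h2 : PySem.Chars.find (ds.drop (PySem.Chars.find ds pvOpenTag).toNat) pvCloseTag = -1) :
    pvRa ds = [] := by
  rw [pvRa]
  split_ifs with h1
  · rfl
  · simp [h2]

lemma pv_g_close {ds : List Char} {j : Nat} (hCj : pvCloseTag <+: ds.drop j)
    (hmin : ∀ i < j, ¬ pvCloseTag <+: ds.drop i) :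
    pvG ds = pvEmitB [] (ds.take j) ++ pvG (ds.drop (j + 10)) := by
  unfold pvG
  rw [pv_chunks_close hCj hmin, List.dropLast_cons_of_ne_nil (pv_chunks_ne_nil _),
    List.foldl_cons, pv_foldl_emit_acc]

lemma pv_ra_pos' {ds : List Char} {o' c' : Nat}
    (ho : PySem.Chars.find ds pvOpenTag = (o' : Int))
    (hc : PySem.Chars.find (ds.drop o') pvCloseTag = (c' : Int)) :
    pvRa ds = String.ofList ((ds.drop o').take (c' + 10)) :: pvRa (ds.drop (o' + c' + 10)) := by
  rw [pvRa]
  simp [ho, hc]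

lemma pv_ra_eq_g (ds : List Char) : pvRa ds = pvG ds := by
  suffices H : ∀ n, ∀ ds : List Char, ds.length ≤ n → pvRa ds = pvG ds from H ds.length ds le_rfl
  intro n
  induction n with
  | zero =>
    intro ds hlen
    have hnil : ds = [] := List.eq_nil_of_length_eq_zero (by omega)
    subst hnil
    rw [pv_ra_neg (pv_find_neg (fun i hp => by
      rw [List.drop_nil] at hp
      have := List.prefix_nil.1 hp
      simp [pvOpenTag] at this))]
    unfold pvG
    rw [show pvChunks [] = [[]] from by rw [pvChunks]]
    simp
  | succ n ih =>
    intro ds hlen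
    by_cases hcl : PySem.Chars.find ds pvCloseTag = -1
    · -- no close tag anywhere: both sides are []
      have hnoC : ∀ i, ¬ pvCloseTag <+: ds.drop i := fun i hp =>
        ((PySem.Chars.find_eq_neg_one_iff ds pvCloseTag).1 hcl) (pv_infix_iff.2 ⟨i, hp⟩)
      have hg : pvG ds = [] := by
        unfold pvG
        rw [pv_chunks_no_close hnoC]
        simp
      rw [hg]
      by_cases ho : PySem.Chars.find ds pvOpenTag = -1
      · rw [pv_ra_neg ho]
      · exact pv_ra_neg2 (pv_find_neg (fun i hp => by
          rw [pv_drop_drop] at hp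
          exact hnoC _ hp))
    · -- first close tag at j
      obtain ⟨j, hjeq, hCj, hjmin⟩ := pv_find_pos hcl
      have h10 : pvCloseTag.length = 10 := rfl
      have hj10 : j + 10 ≤ ds.length := by
        have := hCj.length_le
        rw [List.length_drop] at this
        omega
      have hih : pvRa (ds.drop (j + 10)) = pvG (ds.drop (j + 10)) := by
        apply ih
        rw [List.length_drop]
        omega
      have hsplit := pv_g_close hCj hjmin
      by_cases ho : PySem.Chars.find ds pvOpenTag = -1
      · -- no open tag anywhere: both sides are []
        have hnoO : ∀ i, ¬ pvOpenTag <+: ds.drop i := fun i hp =>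
          ((PySem.Chars.find_eq_neg_one_iff ds pvOpenTag).1 ho) (pv_infix_iff.2 ⟨i, hp⟩)
        rw [pv_ra_neg ho, hsplit]
        have he : pvEmitB [] (ds.take j) = [] := by
          unfold pvEmitB
          rw [pv_find_neg (fun i hp => hnoO i (pv_prefix_of_take_prefix hp))]
          simp
        rw [he, ← hih,
          pv_ra_neg (pv_find_neg (fun i hp => by rw [pv_drop_drop] at hp; exact hnoO _ hp))]
        simp
      · -- first open tag at o'
        obtain ⟨o', hoeq, hOo, homin⟩ := pv_find_pos ho
        by_cases hc2 : PySem.Chars.find (ds.drop o') pvCloseTag = -1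
        · -- no close tag after the first open: A stops, and every remaining chunk has no open
          have hnoC2 : ∀ i, ¬ pvCloseTag <+: ds.drop (o' + i) := fun i hp => by
            rw [← pv_drop_drop] at hp
            exact ((PySem.Chars.find_eq_neg_one_iff _ pvCloseTag).1 hc2) (pv_infix_iff.2 ⟨i, hp⟩)
          have hjo : j + 10 ≤ o' := by
            by_contra hlt
            rcases Nat.lt_or_ge j o' with h1 | h1
            · exact pv_no_overlap hCj
                (show pvOpenTag <+: ds.drop (j + (o' - j)) by
                  rw [show j + (o' - j) = o' by omega]; exact hOo) (by omega)
            · exact hnoC2 (j - o') (by rw [show o' + (j - o') = j by omega]; exact hCj)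
          have he : pvEmitB [] (ds.take j) = [] := by
            unfold pvEmitB
            rw [pv_no_open_in_take homin (by omega)]
            simp
          have hra1 : pvRa ds = [] := pv_ra_neg2 (by
            rw [hoeq, Int.toNat_natCast]
            exact hc2)
          have hfo : PySem.Chars.find (ds.drop (j + 10)) pvOpenTag = ((o' - (j + 10) : Nat) : Int) :=
            pv_find_shift _ _ (by rw [show (j + 10) + (o' - (j + 10)) = o' by omega]; exact hOo)
              (fun i hi => homin (j + 10 + i) (by omega))
          have hra2 : pvRa (ds.drop (j + 10)) = [] := pv_ra_neg2 (by
            rw [hfo, Int.toNat_natCast, pv_drop_drop,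
              show (j + 10) + (o' - (j + 10)) = o' by omega]
            exact hc2)
          rw [hra1, hsplit, he, ← hih, hra2]
          simp
        · -- a close tag follows the first open: the emitted blocks line up
          obtain ⟨c', hceq, hCrel, hcmin⟩ := pv_find_pos hc2
          rw [pv_drop_drop] at hCrel
          rcases Nat.lt_or_ge o' j with hlt | hge
          · -- open before first close: both emit ds[o' : j+10]
            have h9j : o' + 9 ≤ j := by
              by_contra hc9
              exact pv_no_overlap' hOo
                (show pvCloseTag <+: ds.drop (o' + (j - o')) by
                  rw [show o' + (j - o') = j by omega]; exact hCj) (by omega) (by omega)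
            have hceq2 : PySem.Chars.find (ds.drop o') pvCloseTag = ((j - o' : Nat) : Int) :=
              pv_find_shift o' (j - o') (by rw [show o' + (j - o') = j by omega]; exact hCj)
                (fun i hi => hjmin (o' + i) (by omega))
            rw [pv_ra_pos' hoeq hceq2, hsplit, ← hih]
            have hft := pv_find_open_take hOo homin (by omega)
            have hemit : pvEmitB [] (ds.take j) =
                [String.ofList ((ds.take j).drop o' ++ pvCloseTag)] := by
              unfold pvEmitB
              rw [hft]
              simp [PySem.Chars.slice_eq_listSlice, PySem.List.slice_from_natCast]
            rw [hemit]
            have hCtake : ((ds.drop o').drop (j - o')).take 10 = pvCloseTag := by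
              rw [pv_drop_drop, show o' + (j - o') = j by omega]
              exact ((List.prefix_iff_eq_take.1 hCj).symm : (ds.drop j).take pvCloseTag.length = pvCloseTag)
            have hblock : (ds.drop o').take ((j - o') + 10) =
                (ds.take j).drop o' ++ pvCloseTag := by
              rw [List.take_add, hCtake, List.drop_take]
            rw [show o' + (j - o') + 10 = j + 10 by omega, hblock]
            rfl
          · -- open after first close: the first chunk emits nothing, recursion aligns
            have hjo : j + 10 ≤ o' := by
              by_contra hc10
              exact pv_no_overlap hCj
                (show pvOpenTag <+: ds.drop (j + (o' - j)) by
                  rw [show j + (o' - j) = o' by omega]; exact hOo) (by omega)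
            have he : pvEmitB [] (ds.take j) = [] := by
              unfold pvEmitB
              rw [pv_no_open_in_take homin (by omega)]
              simp
            rw [hsplit, he, ← hih]
            simp only [List.nil_append]
            have hfo : PySem.Chars.find (ds.drop (j + 10)) pvOpenTag = ((o' - (j + 10) : Nat) : Int) :=
              pv_find_shift _ _ (by rw [show (j + 10) + (o' - (j + 10)) = o' by omega]; exact hOo)
                (fun i hi => homin (j + 10 + i) (by omega))
            have hfc : PySem.Chars.find ((ds.drop (j + 10)).drop (o' - (j + 10))) pvCloseTag
                = (c' : Int) := by
              rw [pv_drop_drop, show (j + 10) + (o' - (j + 10)) = o' by omega]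
              exact hceq
            rw [pv_ra_pos' hoeq hceq, pv_ra_pos' hfo hfc,
              pv_drop_drop, pv_drop_drop,
              show (j + 10) + (o' - (j + 10)) = o' by omega,
              show (j + 10) + (o' - (j + 10) + c' + 10) = o' + c' + 10 by omega]


lemma pv_ra_nil : pvRa [] = [] :=
  pv_ra_neg (pv_find_neg (fun i hp => by
    rw [List.drop_nil] at hp
    have := List.prefix_nil.1 hp
    simp [pvOpenTag] at this))

lemma pv_loopA_eq (cs : List Char) : ∀ n start, cs.length - start = n → start ≤ cs.length →
    pvLoopA cs start = pvRa (cs.drop start) := by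
  intro n
  induction n using Nat.strong_induction_on with
  | _ n ih =>
    intro start hn hle
    by_cases hlt : start < cs.length
    · rw [pvLoopA, dif_pos hlt,
        PySem.Chars.findFrom_natCast cs pvOpenTag start (by omega)]
      by_cases h1 : PySem.Chars.find (cs.drop start) pvOpenTag = -1
      · rw [if_pos h1, pv_ra_neg h1]
        simp
      · rw [if_neg h1]
        obtain ⟨o', hoeq, hOo, homin⟩ := pv_find_pos h1
        have h9 : pvOpenTag.length = 9 := rfl
        have ho9 : o' + 9 ≤ (cs.drop start).length := by
          have := hOo.length_le
          rw [List.length_drop] at this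
          omega
        rw [List.length_drop] at ho9
        have hcast : (↑start + PySem.Chars.find (cs.drop start) pvOpenTag) = ((start + o' : Nat) : Int) := by
          rw [hoeq]; push_cast; ring
        rw [hcast]
        simp only []
        rw [PySem.Chars.findFrom_natCast cs pvCloseTag (start + o') (by omega),
          ← pv_drop_drop]
        by_cases h2 : PySem.Chars.find ((cs.drop start).drop o') pvCloseTag = -1
        · rw [if_pos h2, pv_ra_neg2 (by rw [hoeq, Int.toNat_natCast]; exact h2)]
          simp
        · rw [if_neg h2]
          obtain ⟨c', hceq, hCrel, hcmin⟩ := pv_find_pos h2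
          have h10 : pvCloseTag.length = 10 := rfl
          have hc10 : o' + c' + 10 ≤ (cs.drop start).length := by
            have := hCrel.length_le
            rw [List.length_drop, List.length_drop] at this
            omega
          rw [List.length_drop] at hc10
          have hcast2 : (((start + o' : Nat) : Int) + PySem.Chars.find ((cs.drop start).drop o') pvCloseTag)
              = ((start + o' + c' : Nat) : Int) := by
            rw [hceq]; push_cast; ring
          rw [hcast2]
          rw [dif_pos (by
            constructor
            · omega
            · omega)]
          have htoNat : ((start + o' + c' : Nat) : Int).toNat + 10 = start + o' + c' + 10 := by
            rw [Int.toNat_natCast]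
          rw [htoNat]
          have hrec := ih (cs.length - (start + o' + c' + 10)) (by omega)
            (start + o' + c' + 10) rfl (by omega)
          rw [hrec]
          rw [pv_ra_pos' hoeq hceq]
          congr 1
          · congr 1
            rw [PySem.Chars.slice_eq_listSlice,
              show ((start + o' + c' : Nat) : Int) + 10 = ((start + o' + c' + 10 : Nat) : Int) by push_cast; ring,
              PySem.List.slice_natCast, pv_drop_drop,
              show start + o' + c' + 10 - (start + o') = c' + 10 by omega]
          · rw [pv_drop_drop, show start + (o' + c' + 10) = start + o' + c' + 10 by omega]
    · rw [pvLoopA, dif_neg hlt, List.drop_eq_nil_of_le (by omega), pv_ra_nil]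


-- ===== VERDICT (by name: the statement is the Claim_ definition above) =====
theorem split_by_prosody_spec : Claim_equal_split_by_prosody := by
  unfold Claim_equal_split_by_prosody Spec_split_by_prosody
  intro buffer _
  unfold split_by_prosody split_by_prosody_alt
  rw [pv_loopA_eq buffer.toList (buffer.toList.length - 0) 0 rfl (by omega), List.drop_zero,
    pv_ra_eq_g]
  unfold pvG
  simp only []
  rw [pv_splitOn_eq, PySem.List.slice_to_neg_one]
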